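-- pv_equiv track=rewrite | github.com/rzhang315/FooBar | stringClean.py | answer
-- ===== SOURCE A (Python) =====
-- def answer(chunk, word):
--     # Declare empty list for results
--     outputs = []
--     # Find indices in string where word occurs
--     instance = []
--
--     for i in range(len(chunk)):
--         if chunk.startswith(word, i):
--             instance.append(i)
--
--     # Loop through those instance
--     for i in instance:
--         # Take out occurrence of word
--         c = chunk[0:i] + chunk[i+len(word):len(chunk)]
--         # One by one, take out remaining occurrences of word
--         while c.find(word) != -1:
--             c = c.replace(word, '', 1)
--         # Append watered down string to result list
--         outputs.append(c)
--     # Sort the list by lexicographically earliest string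
--     outputs.sort(key=lambda item: (len(item), item))
--     # Return 1st element in result list
--     return outputs[0]
-- ===== SOURCE B (Python) =====
-- def answer(chunk, word):
--     k = len(word)
--     wl = list(word)
--     positions = [i for i in range(len(chunk)) if chunk[i:i+k] == word]
--
--     def clean(s):
--         stack = []
--         for ch in s:
--             stack.append(ch)
--             if len(stack) >= k and stack[-k:] == wl:
--                 del stack[-k:]
--         return ''.join(stack)
--
--     candidates = [clean(chunk[:p] + chunk[p + k:]) for p in positions]
--     return min(candidates, key=lambda c: (len(c), c))
-- ===== Notes on version B (the rewrite author's own statement) =====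
-- stated objective: alternative
-- what changed: Each candidate string is cleaned by one left-to-right stack scan that cascades deletions (pop when the stack's suffix equals the word) instead of A's repeated find-and-replace passes that restart from the front, and the best candidate is picked with min(key=(len,item)) instead of sorting the whole list; in CPython this trades A's C-implemented find/replace for a Python-level scan, so it is not measurably faster.
import Mathlib
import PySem

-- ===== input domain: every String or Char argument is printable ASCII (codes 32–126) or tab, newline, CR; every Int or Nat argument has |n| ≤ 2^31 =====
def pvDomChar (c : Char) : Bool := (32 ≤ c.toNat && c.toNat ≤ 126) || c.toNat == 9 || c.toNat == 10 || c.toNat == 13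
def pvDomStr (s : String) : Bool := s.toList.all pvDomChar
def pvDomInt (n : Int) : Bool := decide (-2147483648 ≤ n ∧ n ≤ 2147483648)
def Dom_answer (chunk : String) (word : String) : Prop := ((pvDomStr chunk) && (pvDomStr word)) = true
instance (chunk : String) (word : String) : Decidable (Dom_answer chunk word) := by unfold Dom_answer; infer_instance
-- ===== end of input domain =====

-- B cleans each candidate with one stack scan (cascading deletions) and takes a running minimum
-- instead of A's repeated find/replace passes and full sort (objective: alternative algorithm).


-- ===== PORT A =====
-- c.replace(word, '', 1): remove the first occurrence (exact; c unchanged when word is absent)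
def pyReplace1 (w c : List Char) : List Char :=
  if PySem.Chars.find c w = -1 then c
  else
    let f := (PySem.Chars.find c w).toNat
    c.take f ++ c.drop (f + w.length)

-- termination fact cited by remAll's decreasing_by
lemma pyReplace1_length_lt (w c : List Char) (hf : PySem.Chars.find c w ≠ -1) (hw : w ≠ []) :
    (pyReplace1 w c).length < c.length := by
  have h0 : 0 ≤ PySem.Chars.find c w := by
    have := PySem.Chars.neg_one_le_find c w
    omega
  obtain ⟨hpre, -⟩ := PySem.Chars.find_spec (s := c) (sub := w) h0
  have hlen : w.length ≤ (c.drop (PySem.Chars.find c w).toNat).length := hpre.length_le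
  have hw1 : 1 ≤ w.length := by
    cases w with
    | nil => exact absurd rfl hw
    | cons a t => simp
  simp only [pyReplace1, if_neg hf, List.length_append, List.length_take, List.length_drop]
  simp only [List.length_drop] at hlen
  omega

-- the loop 'while c.find(word) != -1: c = c.replace(word, "", 1)'; the 'w ≠ []' conjunct is a
-- totality guard only (with word = '' Python never leaves this loop; such inputs are outside Pre_)
def remAll (w c : List Char) : List Char :=
  if h : PySem.Chars.find c w ≠ -1 ∧ w ≠ [] then remAll w (pyReplace1 w c) else c
  termination_by c.length
  decreasing_by exact pyReplace1_length_lt w c h.1 h.2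

def answer (chunk : String) (word : String) : String :=
  let s := chunk.toList
  let w := word.toList
  -- chunk.startswith(word, i): exact for the 0 ≤ i < len(chunk) produced by range
  let inst := (PySem.List.pyRange 0 (s.length : Int)).foldl
    (fun acc i => if PySem.Chars.startswith (s.drop i.toNat) w then acc ++ [i] else acc) []
  let outputs := inst.foldl (fun acc i =>
    acc ++ [remAll w (PySem.List.slice s (some 0) (some i) ++
                      PySem.List.slice s (some (i + (w.length : Int))) (some (s.length : Int)))]) []
  -- outputs.sort(key=lambda item: (len(item), item)); outputs[0] (IndexError on empty: outside Pre_)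
  String.mk ((PySem.List.sorted2 outputs (fun c => c.length) (fun c => c)).headD [])

-- ===== PORT B =====
-- one step of B's stack scan: push ch, then pop a cascading occurrence (stack[-k:] == word)
def stackStep (w : List Char) (st : List Char) (ch : Char) : List Char :=
  let st' := st ++ [ch]
  if w.length ≤ st'.length ∧ PySem.List.slice st' (some (-(w.length : Int))) none = w
    then PySem.List.slice st' none (some (-(w.length : Int)))
    else st'

def answer_alt (chunk : String) (word : String) : String :=
  let s := chunk.toList
  let w := word.toList
  let k := w.length
  let positions := (List.range s.length).filter (fun i => (s.drop i).take k = w)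
  let candidates := positions.map (fun p => (s.take p ++ s.drop (p + k)).foldl (stackStep w) [])
  match PySem.List.min2? candidates (fun c => c.length) (fun c => c) with
  | some m => String.mk m
  | none => ""   -- min([]) raises ValueError there; outside Pre_

-- ===== PRECONDITION & SPEC =====
-- Pre_ excludes exactly the inputs on which A does not return: word = '' (A's while loop never
-- terminates, or outputs[0] raises on empty chunk) and word not occurring in chunk (outputs is
-- empty and outputs[0] raises IndexError).
def Pre_answer (chunk : String) (word : String) : Prop :=
  word ≠ "" ∧ PySem.Str.isIn word chunk = true
instance (chunk : String) (word : String) : Decidable (Pre_answer chunk word) := by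
  unfold Pre_answer; infer_instance

def pvWitness_answer : String × String := ("abcabcb", "bc")

def Spec_answer (chunk : String) (word : String) (out : String) : Prop := out = answer_alt chunk word
instance (chunk : String) (word : String) (out : String) : Decidable (Spec_answer chunk word out) := by
  unfold Spec_answer; infer_instance

-- ===== CLAIM (what is proved, stated in full; the proofs are below) =====
def Claim_equal_answer : Prop := ∀ (chunk : String) (word : String), Dom_answer chunk word → Pre_answer chunk word → Spec_answer chunk word (answer chunk word)

-- ===== LEMMAS AND PROOFS =====

lemma slice_neg_from {α : Type} (xs : List α) (k : Nat) (h1 : 1 ≤ k) (h2 : k ≤ xs.length) :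
    PySem.List.slice xs (some (-(k : Int))) none = xs.drop (xs.length - k) := by
  simp only [PySem.List.slice, PySem.List.clampIdx]
  have hneg : (-(k : Int)) < 0 := by omega
  have hnn : ¬ ((xs.length : Int) + (-(k : Int)) < 0) := by omega
  simp only [if_pos hneg, if_neg hnn]
  have h3 : ((xs.length : Int) + -(k : Int)).toNat = xs.length - k := by omega
  rw [h3]
  apply List.take_of_length_le
  simp

lemma slice_neg_to {α : Type} (xs : List α) (k : Nat) (h1 : 1 ≤ k) (h2 : k ≤ xs.length) :
    PySem.List.slice xs none (some (-(k : Int))) = xs.take (xs.length - k) := by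
  simp only [PySem.List.slice, PySem.List.clampIdx]
  have hneg : (-(k : Int)) < 0 := by omega
  have hnn : ¬ ((xs.length : Int) + (-(k : Int)) < 0) := by omega
  simp only [if_pos hneg, if_neg hnn]
  have h3 : ((xs.length : Int) + -(k : Int)).toNat = xs.length - k := by omega
  rw [h3]
  simp

lemma stackStep_eq (w st : List Char) (ch : Char) (hw : w ≠ []) :
    stackStep w st ch =
      if w <:+ (st ++ [ch]) then (st ++ [ch]).take (st.length + 1 - w.length) else st ++ [ch] := by
  have hw1 : 1 ≤ w.length := List.length_pos_iff.mpr hw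
  have hlen' : (st ++ [ch]).length = st.length + 1 := by simp
  by_cases hk : w.length ≤ (st ++ [ch]).length
  · have hiff : ((st ++ [ch]).drop ((st ++ [ch]).length - w.length) = w) ↔ w <:+ (st ++ [ch]) := by
      rw [List.suffix_iff_eq_drop]
      exact eq_comm
    simp only [stackStep, slice_neg_from (st ++ [ch]) w.length hw1 hk,
      slice_neg_to (st ++ [ch]) w.length hw1 hk, hlen']
    by_cases hs : w <:+ (st ++ [ch])
    · rw [if_pos ⟨by omega, by rw [hlen'] at hiff; exact hiff.mpr hs⟩, if_pos hs]
    · rw [if_neg, if_neg hs]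
      rintro ⟨-, h2⟩
      rw [hlen'] at hiff
      exact hs (hiff.mp h2)
  · have hns : ¬ w <:+ (st ++ [ch]) := fun h => hk h.length_le
    simp only [stackStep]
    rw [if_neg, if_neg hns]
    rintro ⟨h1, -⟩; exact hk h1

lemma nopop (w : List Char) (hw : w ≠ []) :
    ∀ (l st : List Char), (∀ i, 0 < i → i ≤ l.length → ¬ w <:+ (st ++ l.take i)) →
      l.foldl (stackStep w) st = st ++ l := by
  intro l
  induction l with
  | nil => intro st _; simp
  | cons a t ih =>
    intro st h
    have h1 : ¬ w <:+ (st ++ [a]) := by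
      have := h 1 (by omega) (by simp)
      simpa using this
    have hstep : stackStep w st a = st ++ [a] := by
      rw [stackStep_eq w st a hw, if_neg h1]
    rw [List.foldl_cons, hstep, ih (st ++ [a]) ?_]
    · simp
    · intro i hi hle
      have := h (i + 1) (by omega) (by simp; omega)
      simpa [List.append_assoc] using this

lemma no_early_suffix (w t : List Char) (hw : w ≠ []) (f : Nat)
    (hpre : w <+: t.drop f) (hmin : ∀ i < f, ¬ w <+: t.drop i) :
    ∀ i, 0 < i → i ≤ f + w.length - 1 → ¬ w <:+ t.take i := by
  intro i hi hle hsuf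
  have hw1 : 1 ≤ w.length := List.length_pos_iff.mpr hw
  have hfle : f ≤ t.length := by
    by_contra hgt
    have : t.drop f = [] := List.drop_eq_nil_of_le (by omega)
    rw [this] at hpre
    exact hw (List.prefix_nil.mp hpre)
  have hkle : w.length ≤ t.length - f := by
    have := hpre.length_le
    simpa using this
  have hilen : i ≤ t.length := by omega
  have htake : (t.take i).length = i := by simp; omega
  have hki : w.length ≤ i := by
    have := hsuf.length_le
    omega
  have hweq : w = (t.take i).drop (i - w.length) := by
    have := List.suffix_iff_eq_drop.mp hsuf
    rwa [htake] at this
  rw [List.drop_take] at hweq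
  have hik : i - (i - w.length) = w.length := by omega
  rw [hik] at hweq
  have : w <+: t.drop (i - w.length) := by
    rw [List.prefix_iff_eq_take]
    have hlw : w.length = w.length := rfl
    convert hweq using 2
  exact hmin (i - w.length) (by omega) this

lemma remAll_eq_stack_aux (w : List Char) (hw : w ≠ []) :
    ∀ n, ∀ t : List Char, t.length ≤ n → remAll w t = t.foldl (stackStep w) [] := by
  intro n
  induction n with
  | zero =>
    intro t ht
    have : t = [] := List.length_eq_zero_iff.mp (by omega)
    subst this
    rw [remAll]
    have : PySem.Chars.find [] w = -1 := by
      rw [PySem.Chars.find_eq_neg_one_iff]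
      intro h
      exact hw (List.eq_nil_of_infix_nil h)
    simp [this]
  | succ n ih =>
    intro t ht
    by_cases hocc : w <:+: t
    · have hf : PySem.Chars.find t w ≠ -1 := (PySem.Chars.find_ne_neg_one_iff t w).mpr hocc
      have h0 : 0 ≤ PySem.Chars.find t w := by
        have := PySem.Chars.neg_one_le_find t w
        omega
      obtain ⟨hpre, hmin⟩ := PySem.Chars.find_spec (s := t) (sub := w) h0
      set f := (PySem.Chars.find t w).toNat with hfdef
      have hw1 : 1 ≤ w.length := List.length_pos_iff.mpr hw
      have hfle : f ≤ t.length := by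
        by_contra hgt
        have : t.drop f = [] := List.drop_eq_nil_of_le (by omega)
        rw [this] at hpre
        exact hw (List.prefix_nil.mp hpre)
      have hkle : w.length ≤ t.length - f := by
        have := hpre.length_le; simpa using this
      -- take (f + k) t = take f t ++ w
      have htk : t.take (f + w.length) = t.take f ++ w := by
        rw [List.take_add]
        congr 1
        have := List.prefix_iff_eq_take.mp hpre
        exact this.symm
      -- A side: one unfolding
      have hA : remAll w t = remAll w (t.take f ++ t.drop (f + w.length)) := by
        rw [remAll]
        rw [dif_pos ⟨hf, hw⟩]
        congr 1
        simp only [pyReplace1, if_neg hf]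
        rw [← hfdef]
      -- stack side
      have hnop1 : (t.take f).foldl (stackStep w) [] = t.take f := by
        apply nopop w hw
        intro i hi hle
        have hle2 : i ≤ f := by simp at hle; omega
        rw [List.take_take, min_eq_left hle2, List.nil_append]
        exact no_early_suffix w t hw f hpre hmin i hi (by omega)
      have hu : (t.take (f + w.length)).foldl (stackStep w) [] = t.take f := by
        have hsplit : t.take (f + w.length) = (t.take f ++ w.dropLast) ++ [w.getLast hw] := by
          rw [htk, List.append_assoc, List.dropLast_append_getLast hw]
        rw [hsplit, List.foldl_append]
        have hulen : (t.take f ++ w.dropLast).length = f + w.length - 1 := by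
          simp [List.length_dropLast]; omega
        have hnopu : (t.take f ++ w.dropLast).foldl (stackStep w) [] = t.take f ++ w.dropLast := by
          apply nopop w hw
          intro i hi hle
          rw [List.nil_append]
          have hpref : (t.take f ++ w.dropLast) <+: t := by
            have h1 : (t.take f ++ w.dropLast) <+: t.take (f + w.length) := by
              rw [hsplit]; exact ⟨[w.getLast hw], rfl⟩
            exact h1.trans (List.take_prefix _ _)
          obtain ⟨v, hv⟩ := hpref
          have hti : (t.take f ++ w.dropLast).take i = t.take i := by
            conv_rhs => rw [← hv]
            exact (List.take_append_of_le_length hle).symm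
          rw [hti]
          exact no_early_suffix w t hw f hpre hmin i hi (by omega)
        rw [hnopu]
        simp only [List.foldl_cons, List.foldl_nil]
        rw [stackStep_eq w _ _ hw]
        have hconc : (t.take f ++ w.dropLast) ++ [w.getLast hw] = t.take f ++ w := by
          rw [List.append_assoc, List.dropLast_append_getLast hw]
        rw [hconc, if_pos (List.suffix_append _ _), hulen]
        have : f + w.length - 1 + 1 - w.length = f := by omega
        rw [this, List.take_append_of_le_length (by simp; omega), List.take_take]
        simp
      have hB : t.foldl (stackStep w) [] = (t.take f ++ t.drop (f + w.length)).foldl (stackStep w) [] := by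
        conv_lhs => rw [← List.take_append_drop (f + w.length) t]
        rw [List.foldl_append, List.foldl_append, hu, hnop1]
      rw [hA, hB]
      exact ih _ (by simp only [List.length_append, List.length_take, List.length_drop]; omega)
    · have hf : PySem.Chars.find t w = -1 := (PySem.Chars.find_eq_neg_one_iff t w).mpr hocc
      rw [remAll]
      rw [dif_neg (by simp [hf])]
      symm
      have := nopop w hw t [] ?_
      · simpa using this
      · intro i hi hle hsuf
        rw [List.nil_append] at hsuf
        exact hocc (hsuf.isInfix.trans (List.take_prefix i t).isInfix)

lemma remAll_eq_stack (w : List Char) (hw : w ≠ []) (t : List Char) :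
    remAll w t = t.foldl (stackStep w) [] :=
  remAll_eq_stack_aux w hw t.length t le_rfl

lemma head?_insertBy {α : Type} (before : α → α → Bool) (x : α) (ys : List α) :
    (PySem.List.insertBy before x ys).head? =
      some (match ys with | [] => x | y :: _ => if before x y then x else y) := by
  cases ys with
  | nil => simp [PySem.List.insertBy]
  | cons y t => by_cases h : before x y <;> simp [PySem.List.insertBy, h]

lemma head?_foldl_insertBy {α : Type} (before : α → α → Bool) (xs : List α) :
    ∀ (acc : List α),
      (xs.foldl (fun a x => PySem.List.insertBy before x a) acc).head? =
      xs.foldl (fun h x => match h with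
        | none => some x
        | some m => if before x m then some x else some m) acc.head? := by
  induction xs with
  | nil => intro acc; simp
  | cons x t ih =>
    intro acc
    rw [List.foldl_cons, List.foldl_cons, ih]
    congr 1
    rw [head?_insertBy]
    cases acc with
    | nil => simp
    | cons a l =>
      simp only [List.head?]
      split <;> rfl

lemma head?_sorted2_eq_min2? {α κ₁ κ₂ : Type} [LT κ₁] [DecidableLT κ₁] [LT κ₂] [DecidableLT κ₂]
    (xs : List α) (k1 : α → κ₁) (k2 : α → κ₂) :
    (PySem.List.sorted2 xs k1 k2).head? = PySem.List.min2? xs k1 k2 := by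
  show (xs.foldl (fun a x => PySem.List.insertBy _ x a) []).head? = _
  rw [head?_foldl_insertBy]
  rfl

lemma min2?_isSome_of_ne_nil {α κ₁ κ₂ : Type} [LT κ₁] [DecidableLT κ₁] [LT κ₂] [DecidableLT κ₂]
    (xs : List α) (k1 : α → κ₁) (k2 : α → κ₂) (h : xs ≠ []) :
    ∃ m, PySem.List.min2? xs k1 k2 = some m := by
  unfold PySem.List.min2?
  cases xs with
  | nil => exact absurd rfl h
  | cons x t =>
    rw [List.foldl_cons]
    show ∃ m, t.foldl _ (some x) = some m
    clear h
    induction t generalizing x with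
    | nil => exact ⟨x, rfl⟩
    | cons y ys ih =>
      rw [List.foldl_cons]
      show ∃ m, ys.foldl _
        (if (decide (k1 y < k1 x) || !decide (k1 x < k1 y) && decide (k2 y < k2 x)) = true
          then some y else some x) = some m
      by_cases hc : (decide (k1 y < k1 x) || !decide (k1 x < k1 y) && decide (k2 y < k2 x)) = true
      · rw [if_pos hc]; exact ih y
      · rw [if_neg hc]; exact ih x

lemma answer_eq_alt (chunk word : String) (hpre : Pre_answer chunk word) :
    answer chunk word = answer_alt chunk word := by
  obtain ⟨hw0, hin⟩ := hpre
  simp only [answer, answer_alt]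
  set s := chunk.toList with hs
  set w := word.toList with hwdef
  have hw : w ≠ [] := fun hnil => hw0 (String.toList_eq_nil_iff.mp hnil)
  have hw1 : 1 ≤ w.length := List.length_pos_iff.mpr hw
  set positions := (List.range s.length).filter (fun i => decide ((s.drop i).take w.length = w))
    with hposdef
  -- the two occurrence scans find the same positions
  have hpred : ∀ i : Nat, PySem.Chars.startswith (s.drop i) w
      = decide ((s.drop i).take w.length = w) := by
    intro i
    rw [Bool.eq_iff_iff, PySem.Chars.startswith_iff, decide_eq_true_iff,
      List.prefix_iff_eq_take, eq_comm]
  have hinst : (PySem.List.pyRange 0 (s.length : Int)).foldl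
      (fun acc i => if PySem.Chars.startswith (s.drop i.toNat) w then acc ++ [i] else acc) []
      = positions.map (fun n : Nat => (n : Int)) := by
    rw [PySem.List.pyRange_zero_natCast, PySem.List.foldl_append_if
      (fun i : Int => PySem.Chars.startswith (s.drop i.toNat) w) (fun i => i),
      List.nil_append, List.map_id', List.filter_map]
    congr 1
    apply List.filter_congr
    intro n _
    simp only [Function.comp, Int.toNat_natCast, hpred n]
  rw [hinst]
  -- candidate by candidate, A's repeated find/replace equals B's stack scan
  have hcand : ∀ n : Nat,
      remAll w (PySem.List.slice s (some 0) (some ((n : Nat) : Int)) ++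
        PySem.List.slice s (some (((n : Nat) : Int) + (w.length : Int))) (some (s.length : Int)))
      = (s.take n ++ s.drop (n + w.length)).foldl (stackStep w) [] := by
    intro n
    have h2 : PySem.List.slice s (some 0) (some ((n : Nat) : Int)) = s.take n := by
      have h0 := PySem.List.slice_natCast s 0 n
      simp only [Nat.cast_zero, Nat.sub_zero, List.drop_zero] at h0
      exact h0
    have h3 : PySem.List.slice s (some (((n : Nat) : Int) + (w.length : Int))) (some (s.length : Int))
        = s.drop (n + w.length) := by
      have hc : ((n : Nat) : Int) + (w.length : Int) = (((n + w.length : Nat)) : Int) := by push_cast; ring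
      rw [hc, PySem.List.slice_natCast]
      apply List.take_of_length_le
      simp
    rw [h2, h3, remAll_eq_stack w hw]
  have houts : (positions.map (fun n : Nat => (n : Int))).foldl
      (fun acc i => acc ++ [remAll w (PySem.List.slice s (some 0) (some i) ++
        PySem.List.slice s (some (i + (w.length : Int))) (some (s.length : Int)))]) []
      = positions.map (fun p => (s.take p ++ s.drop (p + w.length)).foldl (stackStep w) []) := by
    rw [PySem.List.foldl_append_singleton_eq_map, List.nil_append, List.map_map]
    apply List.map_congr_left
    intro n _
    exact hcand n
  rw [houts]
  -- positions is nonempty inside Pre_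
  have hne : positions ≠ [] := by
    rw [PySem.Str.isIn_eq] at hin
    obtain ⟨j, hj⟩ := (PySem.Chars.exists_prefix_drop_iff_isIn w s).mpr hin
    have hjlt : j < s.length := by
      by_contra hge
      rw [List.drop_eq_nil_of_le (by omega)] at hj
      exact hw (List.prefix_nil.mp hj)
    have hmem : j ∈ positions := by
      rw [hposdef]
      refine List.mem_filter.mpr ⟨List.mem_range.mpr hjlt, ?_⟩
      rw [decide_eq_true_iff]
      exact (List.prefix_iff_eq_take.mp hj).symm
    intro hnil
    rw [hnil] at hmem
    exact absurd hmem (List.not_mem_nil)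
  obtain ⟨m, hm⟩ := min2?_isSome_of_ne_nil
    (positions.map (fun p => (s.take p ++ s.drop (p + w.length)).foldl (stackStep w) []))
    (fun c => c.length) (fun c => c) (by simp [hne])
  rw [List.headD_eq_head?_getD, head?_sorted2_eq_min2?, hm]
  rfl

-- ===== VERDICT (by name: the statement is the Claim_ definition above) =====
theorem answer_spec : Claim_equal_answer := by
  intro chunk word _ hpre
  exact answer_eq_alt chunk word hpre
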